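-- pv_equiv track=rewrite | github.com/Velythyl/Algo | composition.py | number_unhash
-- ===== SOURCE A (Python) =====
-- def number_unrep(num):
--     number_undict = {
--         'A': 10,
--         'B': 11
--     }
--
--     if num in number_undict:
--         return number_undict[num]
--     else:
--         return int(num)
--
-- def number_rep(num):
--     number_dict = {
--         10: 'A',
--         11: 'B'
--     }
--
--     if num in number_dict:
--         return number_dict[num]
--     else:
--         return str(num)
--
-- def number_unhash(number_hash, base):
--     # Passe de la base 10 a la base "base"
--     # loosely inspired de https://www.codevscolor.com/python-convert-decimal-ternarybase-3/
--     def _to_base(num):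
--         q, r = divmod(num, base)  # On divise le nombre par base, et on garde le reste aussi.
--         if q == 0:  # S'il n'y a pas de q (donc r rentre dans base)
--             return number_rep(r)  # on retourne r
--         else:  # Sinon,
--             return _to_base(q) + number_rep(r)  # on retourne la base de q, + r
--
--     temp = _to_base(number_hash)
--     func = [number_unrep(char) + 1 for char in temp]
--
--     while len(func) < base:
--         func.insert(0, 1)
--
--     return tuple(func)
-- ===== SOURCE B (Python) =====
-- def number_rep(num):
--     number_dict = {10: 'A', 11: 'B'}
--     if num in number_dict:
--         return number_dict[num]
--     else:
--         return str(num)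
--
--
-- def number_unrep(num):
--     number_undict = {'A': 10, 'B': 11}
--     if num in number_undict:
--         return number_undict[num]
--     else:
--         return int(num)
--
--
-- def number_unhash(number_hash, base):
--     # Iterative base conversion: collect digit chunks least-significant-first,
--     # then join them back-to-front; map and pad in one list expression.
--     chunks = []
--     num = number_hash
--     while True:
--         num, r = divmod(num, base)
--         chunks.append(number_rep(r))
--         if num == 0:
--             break
--     temp = "".join(reversed(chunks))
--     func = [number_unrep(char) + 1 for char in temp]
--     return tuple([1] * max(base - len(func), 0) + func)
-- ===== Notes on version B (the rewrite author's own statement) =====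
-- stated objective: alternative
-- what changed: Replaces A's recursive base conversion (string concatenation on the way back up) and its repeated insert(0,1) padding by an iterative divmod loop that collects digit chunks least-significant-first, a single reversed join, and one replicate-pad list expression; Pre_ excludes only inputs where A raises (base 0, or negative/degenerate base/number making divmod raise or the recursion diverge).
import Mathlib
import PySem

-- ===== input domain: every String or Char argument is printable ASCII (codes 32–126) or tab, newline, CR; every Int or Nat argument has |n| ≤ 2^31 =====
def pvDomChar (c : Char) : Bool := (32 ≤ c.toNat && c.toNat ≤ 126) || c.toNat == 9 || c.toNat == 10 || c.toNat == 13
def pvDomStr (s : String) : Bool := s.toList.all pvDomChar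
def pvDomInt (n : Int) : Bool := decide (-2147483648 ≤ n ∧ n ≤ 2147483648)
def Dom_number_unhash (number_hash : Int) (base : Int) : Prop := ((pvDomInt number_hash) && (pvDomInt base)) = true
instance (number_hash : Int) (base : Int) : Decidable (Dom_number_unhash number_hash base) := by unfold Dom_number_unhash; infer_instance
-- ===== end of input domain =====

-- B replaces A's recursive string-building base conversion by an iterative back-to-front
-- chunk loop with a single join and a replicate pad (objective: alternative decomposition).


-- ===== PORT A =====
-- number_unrep(num) where num is a single character of the digit string; inside Pre_ the
-- character is 'A', 'B' or a decimal digit, so int(num) never raises; `.getD 0` only totalizes.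
def pvNumberUnrep (c : Char) : Int :=
  if c = 'A' then 10 else if c = 'B' then 11 else (PySem.Int.ofChars? [c]).getD 0

-- number_rep(num): strings are carried as List Char (str(num) = PySem.Int.toChars).
def pvNumberRep (num : Int) : List Char :=
  if num = 10 then ['A'] else if num = 11 then ['B'] else PySem.Int.toChars num

-- _to_base: recursion on num, made structural with fuel = number_hash.toNat (enough inside
-- Pre_, where 0 ≤ num and base ≥ 2 make the quotient strictly decrease); fuel 0 is unreachable.
def pvToBase (base : Int) : Nat → Int → List Char
  | fuel, num =>
    let q := PySem.Int.floordiv num base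
    let r := PySem.Int.mod num base
    if q = 0 then pvNumberRep r
    else
      match fuel with
      | 0 => []
      | fuel' + 1 => pvToBase base fuel' q ++ pvNumberRep r

-- while len(func) < base: func.insert(0, 1)
def pvPadA (base : Int) (f : List Int) : List Int :=
  if f.length < base then pvPadA base (1 :: f) else f
termination_by (base - f.length).toNat
decreasing_by simp only [List.length_cons]; omega

def number_unhash (number_hash : Int) (base : Int) : List Int :=
  let temp := pvToBase base number_hash.toNat number_hash
  let func := temp.map (fun c => pvNumberUnrep c + 1)
  pvPadA base func

-- ===== PORT B =====
-- while True: num, r = divmod(num, base); chunks.append(number_rep(r)); if num == 0: break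
-- (fuel as in pvToBase; fuel 0 is unreachable inside Pre_)
def pvChunksB (base : Int) : Nat → Int → List (List Char) → List (List Char)
  | fuel, num, acc =>
    let q := PySem.Int.floordiv num base
    let r := PySem.Int.mod num base
    let acc' := acc ++ [pvNumberRep r]
    if q = 0 then acc'
    else
      match fuel with
      | 0 => acc'
      | fuel' + 1 => pvChunksB base fuel' q acc'

def number_unhash_alt (number_hash : Int) (base : Int) : List Int :=
  let chunks := pvChunksB base number_hash.toNat number_hash []
  let temp := chunks.reverse.flatten
  let func := temp.map (fun c => pvNumberUnrep c + 1)
  List.replicate (max (base - (func.length : Int)) 0).toNat 1 ++ func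

-- ===== PRECONDITION & SPEC =====
-- Pre_ excludes exactly the inputs where A raises: base = 0 (ZeroDivisionError from divmod),
-- and negative number_hash, base = 1 or negative base with nonzero number_hash (unbounded
-- recursion, or a '-' character reaching int() — RecursionError/ValueError); for
-- number_hash = 0 A returns for EVERY nonzero base, and those inputs stay inside Pre_.
def Pre_number_unhash (number_hash : Int) (base : Int) : Prop :=
  (0 ≤ number_hash ∧ 2 ≤ base) ∨ (number_hash = 0 ∧ base ≠ 0)
instance (number_hash : Int) (base : Int) : Decidable (Pre_number_unhash number_hash base) := by
  unfold Pre_number_unhash; infer_instance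

def pvWitness_number_unhash : Int × Int := (10, 3)

def Spec_number_unhash (number_hash : Int) (base : Int) (out : List Int) : Prop := out = number_unhash_alt number_hash base
instance (number_hash : Int) (base : Int) (out : List Int) : Decidable (Spec_number_unhash number_hash base out) := by unfold Spec_number_unhash; infer_instance

-- ===== CLAIM (what is proved, stated in full; the proofs are below) =====
def Claim_equal_number_unhash : Prop := ∀ (number_hash : Int) (base : Int), Dom_number_unhash number_hash base → Pre_number_unhash number_hash base → Spec_number_unhash number_hash base (number_unhash number_hash base)

-- ===== LEMMAS AND PROOFS =====

-- canonical base-b digit list of n, most significant first ('0' is one digit [0])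
def pvCanon (b n : Nat) : List Nat := if n = 0 then [0] else (Nat.digits b n).reverse

lemma pvToBase_eq (b : Int) (hb : 2 ≤ b) :
    ∀ (fuel : Nat) (num : Int), 0 ≤ num → num.toNat ≤ fuel →
      pvToBase b fuel num =
        ((pvCanon b.toNat num.toNat).map (fun d : Nat => pvNumberRep (d : Int))).flatten := by
  obtain ⟨bb, rfl⟩ := Int.eq_ofNat_of_zero_le (by omega : (0:Int) ≤ b)
  have hbb : 2 ≤ bb := by exact_mod_cast hb
  intro fuel
  induction fuel with
  | zero =>
    intro num h0 hf
    have hnum : num = 0 := by omega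
    subst hnum
    rw [pvToBase]
    norm_num [pvCanon, PySem.Int.floordiv, PySem.Int.mod]
  | succ fuel ih =>
    intro num h0 hf
    obtain ⟨n, rfl⟩ := Int.eq_ofNat_of_zero_le h0
    rw [pvToBase]
    simp only [PySem.Int.floordiv_natCast, PySem.Int.mod_natCast, Int.toNat_natCast] at *
    by_cases hq : n / bb = 0
    · have hlt : n < bb := Nat.lt_of_div_eq_zero (by omega) hq
      simp only [hq, Nat.cast_zero, if_true, Nat.mod_eq_of_lt hlt]
      by_cases hn : n = 0
      · simp [hn, pvCanon]
      · rw [pvCanon, if_neg hn, Nat.digits_def' (by omega : 1 < bb) (by omega : 0 < n), hq,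
            Nat.digits_zero, Nat.mod_eq_of_lt hlt]
        simp
    · have hn : n ≠ 0 := by
        intro h; subst h; simp at hq
      have hqlt : n / bb < n := Nat.div_lt_self (by omega) (by omega)
      rw [if_neg (by exact_mod_cast hq)]
      rw [ih (↑(n / bb)) (by positivity) (by simp; omega)]
      simp only [Int.toNat_natCast]
      rw [pvCanon, if_neg hq, pvCanon, if_neg hn,
          Nat.digits_def' (by omega : 1 < bb) (by omega : 0 < n)]
      simp

lemma pvChunksB_eq (b : Int) (hb : 2 ≤ b) :
    ∀ (fuel : Nat) (num : Int) (acc : List (List Char)), 0 ≤ num → num.toNat ≤ fuel →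
      pvChunksB b fuel num acc =
        acc ++ ((pvCanon b.toNat num.toNat).map (fun d : Nat => pvNumberRep (d : Int))).reverse := by
  obtain ⟨bb, rfl⟩ := Int.eq_ofNat_of_zero_le (by omega : (0:Int) ≤ b)
  have hbb : 2 ≤ bb := by exact_mod_cast hb
  intro fuel
  induction fuel with
  | zero =>
    intro num acc h0 hf
    have hnum : num = 0 := by omega
    subst hnum
    rw [pvChunksB]
    norm_num [pvCanon, PySem.Int.floordiv, PySem.Int.mod]
  | succ fuel ih =>
    intro num acc h0 hf
    obtain ⟨n, rfl⟩ := Int.eq_ofNat_of_zero_le h0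
    rw [pvChunksB]
    simp only [PySem.Int.floordiv_natCast, PySem.Int.mod_natCast, Int.toNat_natCast] at *
    by_cases hq : n / bb = 0
    · have hlt : n < bb := Nat.lt_of_div_eq_zero (by omega) hq
      simp only [hq, Nat.cast_zero, if_true, Nat.mod_eq_of_lt hlt]
      by_cases hn : n = 0
      · simp [hn, pvCanon]
      · rw [pvCanon, if_neg hn, Nat.digits_def' (by omega : 1 < bb) (by omega : 0 < n), hq,
            Nat.digits_zero, Nat.mod_eq_of_lt hlt]
        simp
    · have hn : n ≠ 0 := by
        intro h; subst h; simp at hq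
      have hqlt : n / bb < n := Nat.div_lt_self (by omega) (by omega)
      rw [if_neg (by exact_mod_cast hq)]
      rw [ih (↑(n / bb)) _ (by positivity) (by simp; omega)]
      simp only [Int.toNat_natCast]
      rw [pvCanon, if_neg hq, pvCanon, if_neg hn,
          Nat.digits_def' (by omega : 1 < bb) (by omega : 0 < n)]
      simp

lemma pvPadA_aux (b : Int) :
    ∀ (k : Nat) (f : List Int), (b - f.length).toNat ≤ k →
      pvPadA b f = List.replicate (max (b - (f.length : Int)) 0).toNat 1 ++ f := by
  intro k
  induction k with
  | zero =>
    intro f hk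
    have h : ¬ ((f.length : Int) < b) := by omega
    rw [pvPadA, if_neg h]
    have : (max (b - (f.length : Int)) 0).toNat = 0 := by omega
    simp [this]
  | succ k ih =>
    intro f hk
    by_cases h : (f.length : Int) < b
    · rw [pvPadA, if_pos h]
      rw [ih (1 :: f) (by simp; omega)]
      simp only [List.length_cons]
      have he : (max (b - (f.length : Int)) 0).toNat
          = (max (b - ((f.length + 1 : Nat) : Int)) 0).toNat + 1 := by push_cast; omega
      rw [he, List.replicate_succ']
      simp
    · rw [pvPadA, if_neg h]
      have : (max (b - (f.length : Int)) 0).toNat = 0 := by omega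
      simp [this]

lemma pvPadA_eq (b : Int) (f : List Int) :
    pvPadA b f = List.replicate (max (b - (f.length : Int)) 0).toNat 1 ++ f :=
  pvPadA_aux b (b - f.length).toNat f le_rfl

-- ===== VERDICT (by name: the statement is the Claim_ definition above) =====
theorem number_unhash_spec : Claim_equal_number_unhash := by
  intro h b _ pre
  unfold Spec_number_unhash
  rcases pre with ⟨h0, hb⟩ | ⟨rfl, hb0⟩
  · simp only [number_unhash, number_unhash_alt]
    rw [pvToBase_eq b hb h.toNat h h0 le_rfl,
        pvChunksB_eq b hb h.toNat h [] h0 le_rfl,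
        List.nil_append, List.reverse_reverse, pvPadA_eq]
  · simp only [number_unhash, number_unhash_alt, Int.toNat_zero]
    rw [pvToBase, pvChunksB]
    have hq : PySem.Int.floordiv 0 b = 0 := by simp [PySem.Int.floordiv]
    have hm : PySem.Int.mod 0 b = 0 := by simp [PySem.Int.mod]
    have h1 : pvNumberRep 0 = ['0'] := by decide
    have h2 : pvNumberUnrep '0' = 0 := by decide
    simp only [hq, hm, List.nil_append]
    rw [pvPadA_eq]
    simp [h1, h2]
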